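-- pv_equiv track=rewrite | github.com/alitasavori/GNN-Sandia | run_injection_dataset.py | parse_bus_spec
-- ===== SOURCE A (Python) =====
-- def parse_bus_spec(bus_full):
--     parts = bus_full.split(".")
--     bus = parts[0]
--     phs = []
--     for p in parts[1:]:
--         try:
--             ip = int(p)
--             if ip in (1, 2, 3):
--                 phs.append(ip)
--         except Exception:
--             pass
--     return bus, sorted(list(set(phs)))
-- ===== SOURCE B (Python) =====
-- def _maybe_int(t):
--     try:
--         return int(t)
--     except Exception:
--         return None
--
--
-- def parse_bus_spec(bus_full):
--     # Candidate-major: for each phase candidate in order, scan the tokens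
--     # for a match; no accumulator, no set, no sort.
--     parts = bus_full.split(".")
--     tail = parts[1:]
--     return parts[0], [d for d in (1, 2, 3) if any(_maybe_int(t) == d for t in tail)]
-- ===== Notes on version B (the rewrite author's own statement) =====
-- stated objective: alternative
-- what changed: B inverts the loop nesting: instead of A's token-major pass that accumulates matching ints and then dedups-and-sorts them, B iterates over the fixed candidates (1,2,3) and for each does an inner any-scan of the tokens for one that parses to it, so no accumulator, no set and no sort exist.
import Mathlib
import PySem

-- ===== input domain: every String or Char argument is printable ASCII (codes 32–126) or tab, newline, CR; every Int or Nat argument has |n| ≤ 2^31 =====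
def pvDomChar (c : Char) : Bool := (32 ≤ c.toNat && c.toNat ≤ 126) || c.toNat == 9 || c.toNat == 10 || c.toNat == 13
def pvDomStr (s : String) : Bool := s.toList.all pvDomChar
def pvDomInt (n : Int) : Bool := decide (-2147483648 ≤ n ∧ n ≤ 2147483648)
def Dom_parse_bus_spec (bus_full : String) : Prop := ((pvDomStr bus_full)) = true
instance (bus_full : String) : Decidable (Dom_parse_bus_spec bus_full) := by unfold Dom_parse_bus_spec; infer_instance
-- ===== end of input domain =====

-- B inverts the loop nesting: candidate-major filter of (1,2,3) with an inner any-scan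
-- of the tokens, instead of A's token-major accumulate + sorted(set(...)); objective: alternative.


-- ===== PORT A =====
def parse_bus_spec (bus_full : String) : String × List Int :=
  let parts := (PySem.Str.split? bus_full ".").getD []   -- "." ≠ "" so split? is some
  let bus := parts.headD ""                              -- parts[0]; split always nonempty
  let phs : List Int := (PySem.List.slice parts (some 1) none).foldl (fun acc p =>
    match PySem.Int.ofStr? p with                        -- try: ip = int(p) … except: pass
    | some ip => if ip = 1 ∨ ip = 2 ∨ ip = 3 then acc ++ [ip] else acc
    | none => acc) []
  (bus, PySem.List.sorted (PySem.Set.ofList phs) (fun x => x) false)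

-- ===== PORT B =====
def pvMaybeInt (t : String) : Option Int :=              -- _maybe_int: int(t) or None
  PySem.Int.ofStr? t

def parse_bus_spec_alt (bus_full : String) : String × List Int :=
  let parts := (PySem.Str.split? bus_full ".").getD []   -- "." ≠ "" so split? is some
  let tail := PySem.List.slice parts (some 1) none       -- parts[1:]
  (parts.headD "",
   ([1, 2, 3] : List Int).filter (fun d => tail.any (fun t => pvMaybeInt t == some d)))

-- ===== PRECONDITION & SPEC =====
def Spec_parse_bus_spec (bus_full : String) (out : String × List Int) : Prop := out = parse_bus_spec_alt bus_full
instance (bus_full : String) (out : String × List Int) : Decidable (Spec_parse_bus_spec bus_full out) := by unfold Spec_parse_bus_spec; infer_instance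

-- ===== CLAIM (what is proved, stated in full; the proofs are below) =====
def Claim_equal_parse_bus_spec : Prop := ∀ (bus_full : String), Dom_parse_bus_spec bus_full → Spec_parse_bus_spec bus_full (parse_bus_spec bus_full)

-- ===== LEMMAS AND PROOFS =====

-- the body of A's loop
def pvStepA (acc : List Int) (p : String) : List Int :=
  match PySem.Int.ofStr? p with
  | some ip => if ip = 1 ∨ ip = 2 ∨ ip = 3 then acc ++ [ip] else acc
  | none => acc

-- membership in A's accumulated list: x was already in acc, or some token parses to x ∈ {1,2,3}
lemma mem_foldA (L : List String) (acc : List Int) (x : Int) :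
    x ∈ L.foldl pvStepA acc ↔
      x ∈ acc ∨ ((x = 1 ∨ x = 2 ∨ x = 3) ∧ ∃ t ∈ L, PySem.Int.ofStr? t = some x) := by
  induction L generalizing acc with
  | nil => simp
  | cons p L ih =>
    simp only [List.foldl_cons, ih, List.mem_cons]
    unfold pvStepA
    cases hp : PySem.Int.ofStr? p with
    | none =>
      constructor
      · rintro (h | h)
        · exact Or.inl h
        · exact Or.inr ⟨h.1, h.2.choose, Or.inr h.2.choose_spec.1, h.2.choose_spec.2⟩
      · rintro (h | ⟨hx, t, (rfl | ht), hpt⟩)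
        · exact Or.inl h
        · rw [hp] at hpt; cases hpt
        · exact Or.inr ⟨hx, t, ht, hpt⟩
    | some ip =>
      by_cases hip : ip = 1 ∨ ip = 2 ∨ ip = 3
      · simp only [hip, if_true, List.mem_append, List.mem_singleton]
        constructor
        · rintro ((h | rfl) | h)
          · exact Or.inl h
          · exact Or.inr ⟨hip, p, Or.inl rfl, hp⟩
          · exact Or.inr ⟨h.1, h.2.choose, Or.inr h.2.choose_spec.1, h.2.choose_spec.2⟩
        · rintro (h | ⟨hx, t, (rfl | ht), hpt⟩)
          · exact Or.inl (Or.inl h)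
          · rw [hp] at hpt; cases hpt; exact Or.inl (Or.inr rfl)
          · exact Or.inr ⟨hx, t, ht, hpt⟩
      · simp only [hip, if_false]
        constructor
        · rintro (h | h)
          · exact Or.inl h
          · exact Or.inr ⟨h.1, h.2.choose, Or.inr h.2.choose_spec.1, h.2.choose_spec.2⟩
        · rintro (h | ⟨hx, t, (rfl | ht), hpt⟩)
          · exact Or.inl h
          · rw [hp] at hpt; cases hpt; exact absurd hx hip
          · exact Or.inr ⟨hx, t, ht, hpt⟩

-- sorted(set(phs)) = the candidates of [1,2,3] present in phs, for any phs ⊆ {1,2,3}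
lemma sorted_set_eq_filter (phs : List Int) (p : Int → Bool)
    (hiff : ∀ x, x ∈ phs ↔ (x = 1 ∨ x = 2 ∨ x = 3) ∧ p x = true) :
    PySem.List.sorted (PySem.Set.ofList phs) (fun x => x) false
      = ([1, 2, 3] : List Int).filter p := by
  apply PySem.List.sorted_eq_of_perm_of_pairwise_lt
  · apply (List.perm_ext_iff_of_nodup ?_ ?_).mpr
    · intro x
      rw [List.mem_filter, PySem.Set.mem_ofList, hiff x]
      constructor <;> exact fun h => ⟨by simpa using h.1, h.2⟩
    · exact List.Nodup.filter _ (by decide)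
    · exact PySem.Set.nodup_ofList phs
  · exact List.Pairwise.filter _ (l := [1, 2, 3]) (by decide)

-- ===== VERDICT (by name: the statement is the Claim_ definition above) =====
theorem parse_bus_spec_spec : Claim_equal_parse_bus_spec := by
  intro bus_full _
  unfold Spec_parse_bus_spec parse_bus_spec parse_bus_spec_alt
  set L := PySem.List.slice ((PySem.Str.split? bus_full ".").getD []) (some 1) none with hL
  refine Prod.ext rfl ?_
  simp only
  apply sorted_set_eq_filter
  intro x
  have h := mem_foldA L [] x
  simp only [List.not_mem_nil, false_or] at h
  rw [show (L.foldl (fun acc p =>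
      match PySem.Int.ofStr? p with
      | some ip => if ip = 1 ∨ ip = 2 ∨ ip = 3 then acc ++ [ip] else acc
      | none => acc) []) = L.foldl pvStepA [] from rfl, h]
  rw [← hL]
  simp [pvMaybeInt, List.any_eq_true]
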